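-- pv_equiv track=rewrite | github.com/Erasebox/MDKP_DA | simulator/run_cucb_overlay_da.py | _build_base_adj
-- ===== SOURCE A (Python) =====
-- def _build_base_adj(b, base_type='cycle'):
--     adj = {i: [] for i in range(b)}
--     if base_type == 'cycle':
--         for i in range(b):
--             adj[i].append((i+1)%b); adj[i].append((i-1)%b)
--     elif base_type == 'path':
--         for i in range(b-1):
--             adj[i].append(i+1); adj[i+1].append(i)
--     else:
--         for i in range(b):
--             adj[i] = [j for j in range(b) if j!=i]
--     for k in list(adj.keys()):
--         adj[k] = sorted(set(adj[k]))
--     return adj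
-- ===== SOURCE B (Python) =====
-- def _build_base_adj(b, base_type='cycle'):
--     # Build the undirected edge relation first, then project it onto the nodes.
--     # An undirected edge {x, y} is represented as the normalised pair (min, max).
--     if base_type == 'cycle':
--         edges = {(i, (i + 1) % b) if i <= (i + 1) % b else ((i + 1) % b, i) for i in range(b)}
--     elif base_type == 'path':
--         edges = {(i, i + 1) for i in range(b - 1)}
--     else:
--         edges = {(i, j) for i in range(b) for j in range(i + 1, b)}
--     adj = {i: set() for i in range(b)}
--     for u, v in edges:
--         adj[u].add(v)   # a self-edge (u, u) makes u its own neighbour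
--         adj[v].add(u)
--     return {k: sorted(v) for k, v in adj.items()}
-- ===== Notes on version B (the rewrite author's own statement) =====
-- stated objective: alternative
-- what changed: B first computes the undirected edge relation as a set of frozenset pairs (cycle/path/complete) and then projects each edge onto both endpoints' neighbour sets, instead of A's per-node append loops followed by a sorted(set(...)) clean-up pass.
import Mathlib
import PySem

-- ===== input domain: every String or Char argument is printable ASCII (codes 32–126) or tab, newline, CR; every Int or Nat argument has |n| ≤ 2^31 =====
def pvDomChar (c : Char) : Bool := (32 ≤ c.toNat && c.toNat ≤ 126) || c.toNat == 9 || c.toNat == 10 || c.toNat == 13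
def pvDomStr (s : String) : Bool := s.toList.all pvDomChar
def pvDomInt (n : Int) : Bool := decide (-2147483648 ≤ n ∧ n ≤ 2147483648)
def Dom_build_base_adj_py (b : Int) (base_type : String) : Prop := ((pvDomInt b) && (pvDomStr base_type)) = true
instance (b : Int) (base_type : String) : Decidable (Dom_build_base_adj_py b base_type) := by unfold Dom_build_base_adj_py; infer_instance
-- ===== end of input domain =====

-- B builds the undirected edge relation first and projects it onto the nodes, instead of
-- appending per node and post-cleaning (objective: alternative decomposition; same asymptotic cost, not faster).
-- Returned dicts are rendered as association lists in key-insertion order.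

-- ===== PORT A =====
-- literal transliteration of _build_base_adj (Source A)
def build_base_adj_py (b : Int) (base_type : String) : List (Int × List Int) :=
  -- adj = {i: [] for i in range(b)}
  let adj0 : PySem.Dict Int (List Int) :=
    (PySem.List.pyRange 0 b 1).foldl (fun d i => d.insert i ([] : List Int)) PySem.Dict.empty
  let adj1 : PySem.Dict Int (List Int) :=
    if base_type == "cycle" then
      -- for i in range(b): adj[i].append((i+1)%b); adj[i].append((i-1)%b)
      (PySem.List.pyRange 0 b 1).foldl
        (fun d i => (d.modify i [] (fun l => l ++ [PySem.Int.mod (i+1) b])).modify i []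
                      (fun l => l ++ [PySem.Int.mod (i-1) b])) adj0
    else if base_type == "path" then
      -- for i in range(b-1): adj[i].append(i+1); adj[i+1].append(i)
      (PySem.List.pyRange 0 (b-1) 1).foldl
        (fun d i => (d.modify i [] (fun l => l ++ [i+1])).modify (i+1) [] (fun l => l ++ [i])) adj0
    else
      -- for i in range(b): adj[i] = [j for j in range(b) if j != i]
      (PySem.List.pyRange 0 b 1).foldl
        (fun d i => d.insert i ((PySem.List.pyRange 0 b 1).filter (fun j => !(j == i)))) adj0
  -- for k in list(adj.keys()): adj[k] = sorted(set(adj[k]))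
  (adj1.keys.foldl
    (fun d k => d.insert k (PySem.List.sorted (PySem.Set.ofList (d.getD k [])) (fun x => x) false))
    adj1).items

-- ===== PORT B =====
-- Source B's normalised undirected edge (min, max) for the cycle branch
def pvNormPair (x y : Int) : Int × Int := if x ≤ y then (x, y) else (y, x)

-- literal transliteration of Source B (the 'for e in edges' loop iterates a set whose order the
-- result does not depend on: each edge only adds both endpoints to each other's neighbour set)
def build_base_adj_py_alt (b : Int) (base_type : String) : List (Int × List Int) :=
  let edges : PySem.Set (Int × Int) :=
    if base_type == "cycle" then
      PySem.Set.ofList ((PySem.List.pyRange 0 b 1).map (fun i => pvNormPair i (PySem.Int.mod (i+1) b)))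
    else if base_type == "path" then
      PySem.Set.ofList ((PySem.List.pyRange 0 (b-1) 1).map (fun i => ((i, i+1) : Int × Int)))
    else
      PySem.Set.ofList ((PySem.List.pyRange 0 b 1).flatMap
        (fun i => (PySem.List.pyRange (i+1) b 1).map (fun j => ((i, j) : Int × Int))))
  -- adj = {i: set() for i in range(b)}
  let adj0 : PySem.Dict Int (PySem.Set Int) :=
    (PySem.List.pyRange 0 b 1).foldl (fun d i => d.insert i PySem.Set.empty) PySem.Dict.empty
  -- for u, v in edges: adj[u].add(v); adj[v].add(u)
  let adj : PySem.Dict Int (PySem.Set Int) :=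
    edges.foldl
      (fun d e => (d.modify e.1 PySem.Set.empty (fun s => PySem.Set.add s e.2)).modify e.2
                    PySem.Set.empty (fun s => PySem.Set.add s e.1)) adj0
  -- return {k: sorted(v) for k, v in adj.items()}
  (adj.items.foldl
    (fun d p => d.insert p.1 (PySem.List.sorted p.2 (fun x => x) false))
    PySem.Dict.empty).items

-- ===== PRECONDITION & SPEC =====
def Spec_build_base_adj_py (b : Int) (base_type : String) (out : List (Int × List Int)) : Prop := out = build_base_adj_py_alt b base_type
instance (b : Int) (base_type : String) (out : List (Int × List Int)) : Decidable (Spec_build_base_adj_py b base_type out) := by unfold Spec_build_base_adj_py; infer_instance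

-- ===== CLAIM (what is proved, stated in full; the proofs are below) =====
def Claim_equal_build_base_adj_py : Prop := ∀ (b : Int) (base_type : String), Dom_build_base_adj_py b base_type → Spec_build_base_adj_py b base_type (build_base_adj_py b base_type)

-- ===== LEMMAS AND PROOFS =====

-- the initial dict {i: v0 for i in R} (fresh distinct keys)
theorem pvInitItems {ν : Type} (R : List Int) (hR : R.Nodup) (v0 : ν) :
    ((R.foldl (fun d i => d.insert i v0) PySem.Dict.empty)).items = R.map (fun i => (i, v0)) := by
  have h := PySem.Dict.items_foldl_insert_fresh R (fun a => a) (fun _ => v0) PySem.Dict.empty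
    (by intro a _; simp) (by simpa using hR)
  simpa using h

theorem pvInitKeys {ν : Type} (R : List Int) (hR : R.Nodup) (v0 : ν) :
    ((R.foldl (fun d i => d.insert i v0) PySem.Dict.empty)).keys = R := by
  simp only [PySem.Dict.keys, pvInitItems R hR v0]
  simp [Function.comp_def]

theorem pvInitGetD {ν : Type} (R : List Int) (hR : R.Nodup) (v0 dflt : ν) (k : Int) :
    ((R.foldl (fun d i => d.insert i v0) PySem.Dict.empty)).getD k dflt
      = if k ∈ R then v0 else dflt := by
  by_cases hk : k ∈ R
  · have hmem : (k, v0) ∈ ((R.foldl (fun d i => d.insert i v0) PySem.Dict.empty)).items := by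
      rw [pvInitItems R hR v0]; exact List.mem_map.mpr ⟨k, hk, rfl⟩
    have hnd : ((R.foldl (fun d i => d.insert i v0) PySem.Dict.empty)).keys.Nodup := by
      rw [pvInitKeys R hR v0]; exact hR
    simp [hk, PySem.Dict.getD_of_mem_items _ hmem hnd]
  · have hc : ((R.foldl (fun d i => d.insert i v0) PySem.Dict.empty)).contains k = false := by
      rw [← Bool.not_eq_true, PySem.Dict.contains_iff_mem_keys, pvInitKeys R hR v0]; exact hk
    simp [hk, PySem.Dict.getD_of_not_contains _ dflt hc]

-- A's per-iteration pair of appends, reshaped to one append per element of a pair list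
theorem pvFoldlTwoAppends (key1 key2 val1 val2 : Int → Int) :
    ∀ (L : List Int) (d : PySem.Dict Int (List Int)),
      L.foldl (fun d i => (d.modify (key1 i) [] (fun l => l ++ [val1 i])).modify (key2 i) []
                 (fun l => l ++ [val2 i])) d
      = (L.flatMap (fun i => [(key1 i, val1 i), (key2 i, val2 i)])).foldl
          (fun d p => d.modify p.1 [] (fun l => l ++ [p.2])) d
  | [], d => rfl
  | i :: L, d => by
    simp only [List.foldl_cons, List.flatMap_cons, List.foldl_append]
    exact pvFoldlTwoAppends key1 key2 val1 val2 L _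

-- the final normalisation loop of A: rewrite each present key once
theorem pvNormGetD :
    ∀ (L : List Int) (d : PySem.Dict Int (List Int)) (c : Int), L.Nodup →
      ((L.foldl (fun d k => d.insert k (PySem.List.sorted (PySem.Set.ofList (d.getD k [])) (fun x => x) false)) d).getD c [])
      = if c ∈ L then PySem.List.sorted (PySem.Set.ofList (d.getD c [])) (fun x => x) false
        else d.getD c []
  | [], d, c, _ => by simp
  | i :: L, d, c, h => by
    simp only [List.foldl_cons]
    rw [pvNormGetD L _ c (List.Nodup.of_cons h)]
    by_cases hc : c = i
    · subst hc
      have hni : c ∉ L := (List.nodup_cons.mp h).1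
      simp [hni]
    · simp [hc, PySem.Dict.getD_insert]

theorem pvUpdateSubset (s : PySem.Set Int) (xs : List Int) (h : ∀ x ∈ xs, x ∈ s) :
    PySem.Set.update s xs = s := by
  rw [PySem.Set.update_eq_append_filter]
  have hnil : List.filter (fun y => !PySem.Set.contains s y) (PySem.Set.ofList xs) = [] := by
    apply List.filter_eq_nil_iff.mpr
    intro y hy
    have hys : y ∈ s := h y ((PySem.Set.mem_ofList xs y).mp hy)
    simp [hys]
  rw [hnil, List.append_nil]

-- B's edge loop: membership in the neighbour set at k
theorem pvBMem (E : List (Int × Int)) :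
    ∀ (d : PySem.Dict Int (PySem.Set Int)) (k x : Int),
      (x ∈ (E.foldl (fun d e => (d.modify e.1 PySem.Set.empty (fun s => PySem.Set.add s e.2)).modify e.2
                        PySem.Set.empty (fun s => PySem.Set.add s e.1)) d).getD k PySem.Set.empty)
      ↔ x ∈ d.getD k PySem.Set.empty ∨ ∃ e ∈ E, (e.1 = k ∧ x = e.2) ∨ (e.2 = k ∧ x = e.1) := by
  induction E with
  | nil => intro d k x; simp
  | cons e E ih =>
    intro d k x
    rw [List.foldl_cons, ih]
    have hstep : ∀ c : Int,
        ((d.modify e.1 PySem.Set.empty (fun s => PySem.Set.add s e.2)).modify e.2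
            PySem.Set.empty (fun s => PySem.Set.add s e.1)).getD c PySem.Set.empty
        = (if c = e.2 then PySem.Set.add (if e.2 = e.1 then PySem.Set.add (d.getD e.1 PySem.Set.empty) e.2 else d.getD e.2 PySem.Set.empty) e.1
           else if c = e.1 then PySem.Set.add (d.getD e.1 PySem.Set.empty) e.2 else d.getD c PySem.Set.empty) := by
      intro c
      rw [PySem.Dict.getD_modify, PySem.Dict.getD_modify, PySem.Dict.getD_modify]
    rw [hstep k]
    by_cases h2 : k = e.2 <;> by_cases h1 : k = e.1 <;>
      simp [h2, h1, PySem.Set.mem_add] <;> aesop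

theorem pvBNodup (E : List (Int × Int)) :
    ∀ (d : PySem.Dict Int (PySem.Set Int)),
      (∀ k, (d.getD k PySem.Set.empty).Nodup) →
      ∀ k, ((E.foldl (fun d e => (d.modify e.1 PySem.Set.empty (fun s => PySem.Set.add s e.2)).modify e.2
                        PySem.Set.empty (fun s => PySem.Set.add s e.1)) d).getD k PySem.Set.empty).Nodup := by
  induction E with
  | nil => intro d h k; simpa using h k
  | cons e E ih =>
    intro d h k
    rw [List.foldl_cons]
    apply ih
    intro c
    rw [PySem.Dict.getD_modify, PySem.Dict.getD_modify, PySem.Dict.getD_modify]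
    split_ifs <;> try exact PySem.Set.nodup_add _ _ (h _)
    · exact PySem.Set.nodup_add _ _ (PySem.Set.nodup_add _ _ (h _))
    · exact h _

theorem pvBKeys (E : List (Int × Int)) :
    ∀ (d : PySem.Dict Int (PySem.Set Int)),
      (∀ e ∈ E, d.contains e.1 = true ∧ d.contains e.2 = true) →
      (E.foldl (fun d e => (d.modify e.1 PySem.Set.empty (fun s => PySem.Set.add s e.2)).modify e.2
          PySem.Set.empty (fun s => PySem.Set.add s e.1)) d).keys = d.keys := by
  induction E with
  | nil => intro d _; rfl
  | cons e E ih =>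
    intro d h
    rw [List.foldl_cons]
    have h1 := (h e (by simp)).1
    have h2 := (h e (by simp)).2
    have hk1 : ((d.modify e.1 PySem.Set.empty (fun s => PySem.Set.add s e.2)).modify e.2
        PySem.Set.empty (fun s => PySem.Set.add s e.1)).keys = d.keys := by
      rw [PySem.Dict.keys_modify, PySem.Dict.keys_insert_of_contains, PySem.Dict.keys_modify,
        PySem.Dict.keys_insert_of_contains] <;>
        simp [PySem.Dict.contains_modify, h1, h2]
    rw [ih _ ?_, hk1]
    intro e' he'
    have he := h e' (List.mem_cons_of_mem _ he')
    constructor <;> simp [PySem.Dict.contains_modify, he.1, he.2]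

-- symmetric reading of an unordered pair
theorem pvNormPairSym (u v k x : Int) :
    (((pvNormPair u v).1 = k ∧ x = (pvNormPair u v).2) ∨ ((pvNormPair u v).2 = k ∧ x = (pvNormPair u v).1))
    ↔ ((u = k ∧ x = v) ∨ (v = k ∧ x = u)) := by
  unfold pvNormPair; split_ifs <;> simp <;> tauto

theorem pvNormPairMem (u v : Int) :
    ((pvNormPair u v).1 = u ∨ (pvNormPair u v).1 = v) ∧ ((pvNormPair u v).2 = u ∨ (pvNormPair u v).2 = v) := by
  unfold pvNormPair; split_ifs <;> simp


-- finishing stage of A: items of the normalisation loop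
theorem pvFinishA (adj1 : PySem.Dict Int (List Int)) (R : List Int)
    (hkeys : adj1.keys = R) (hnd : R.Nodup) :
    (adj1.keys.foldl
      (fun d k => d.insert k (PySem.List.sorted (PySem.Set.ofList (d.getD k [])) (fun x => x) false))
      adj1).items
    = R.map (fun k => (k, PySem.List.sorted (PySem.Set.ofList (adj1.getD k [])) (fun x => x) false)) := by
  rw [hkeys]
  have hK : (R.foldl
      (fun d k => d.insert k (PySem.List.sorted (PySem.Set.ofList (d.getD k [])) (fun x => x) false))
      adj1).keys = R := by
    have h := PySem.Dict.keys_foldl_insert R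
      (fun d k => PySem.List.sorted (PySem.Set.ofList (d.getD k [])) (fun x => x) false) adj1
    rw [h, hkeys, pvUpdateSubset R R (fun x hx => hx)]
  rw [PySem.Dict.items_eq_map_keys _ (by rw [hK]; exact hnd) ([] : List Int), hK]
  apply List.map_congr_left
  intro k hk
  rw [pvNormGetD R adj1 k hnd]
  simp [hk]

-- finishing stage of B: items of the dict comprehension
theorem pvFinishB (adj : PySem.Dict Int (PySem.Set Int)) (R : List Int)
    (hkeys : adj.keys = R) (hnd : R.Nodup) :
    ((adj.items.foldl
      (fun d p => d.insert p.1 (PySem.List.sorted p.2 (fun x => x) false)) PySem.Dict.empty)).items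
    = R.map (fun k => (k, PySem.List.sorted (adj.getD k PySem.Set.empty) (fun x => x) false)) := by
  have hknd : adj.keys.Nodup := hkeys ▸ hnd
  have h := PySem.Dict.items_foldl_insert_fresh adj.items (fun p => p.1)
    (fun p => PySem.List.sorted p.2 (fun x => x) false) PySem.Dict.empty
    (by intro a _; simp) (by simpa [PySem.Dict.keys] using hknd)
  rw [h, PySem.Dict.items_eq_map_keys adj hknd PySem.Set.empty, hkeys]
  rw [show PySem.Dict.empty.items = ([] : List (Int × PySem.Set Int)) from rfl, List.nil_append]
  simp [List.map_map, Function.comp_def]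

-- generic insert loop over distinct keys (A's complete branch)
theorem pvInsGetD (g : Int → List Int) :
    ∀ (L : List Int) (d : PySem.Dict Int (List Int)) (c : Int), L.Nodup →
      ((L.foldl (fun d i => d.insert i (g i)) d).getD c []) = if c ∈ L then g c else d.getD c []
  | [], d, c, _ => by simp
  | i :: L, d, c, h => by
    simp only [List.foldl_cons]
    rw [pvInsGetD g L _ c (List.Nodup.of_cons h)]
    by_cases hc : c = i
    · subst hc
      have hni : c ∉ L := (List.nodup_cons.mp h).1
      simp [hni]
    · simp [hc, PySem.Dict.getD_insert]

-- sorted(set(rawA)) = sorted(valB) once they have the same members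
theorem pvPointwise (rawA : List Int) (valB : PySem.Set Int) (hnodB : valB.Nodup)
    (hmem : ∀ x, x ∈ rawA ↔ x ∈ valB) :
    PySem.List.sorted (PySem.Set.ofList rawA) (fun x => x) false
      = PySem.List.sorted valB (fun x => x) false := by
  rw [PySem.List.sorted_id_eq_sorted_id_iff_perm,
    List.perm_ext_iff_of_nodup (PySem.Set.nodup_ofList rawA) hnodB]
  intro a; rw [PySem.Set.mem_ofList]; exact hmem a

-- Python's (i+1) % b and (k-1) % b on 0 ≤ i,k < b, in closed form
theorem pvModSucc (b i : Int) (h : 0 ≤ i ∧ i < b) :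
    PySem.Int.mod (i+1) b = if i+1 < b then i+1 else 0 := by
  rw [PySem.Int.mod_eq_emod_of_pos (by omega)]
  split_ifs with h1
  · exact Int.emod_eq_of_lt (by omega) h1
  · have : i + 1 = b := by omega
    rw [this, Int.emod_self]

theorem pvModPred (b k : Int) (h : 0 ≤ k ∧ k < b) :
    PySem.Int.mod (k-1) b = if 1 ≤ k then k-1 else b-1 := by
  rw [PySem.Int.mod_eq_emod_of_pos (by omega)]
  split_ifs with h1
  · exact Int.emod_eq_of_lt (by omega) (by omega)
  · have h2 : k - 1 = (b-1) + b * (-1) := by omega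
    rw [h2, Int.add_mul_emod_self_left, Int.emod_eq_of_lt (by omega) (by omega)]

theorem pvCycleArith (b k : Int) (hk : 0 ≤ k ∧ k < b) :
    0 ≤ PySem.Int.mod (k-1) b ∧ PySem.Int.mod (k-1) b < b ∧
      PySem.Int.mod (PySem.Int.mod (k-1) b + 1) b = k := by
  rw [pvModPred b k hk]
  split_ifs with h
  · rw [pvModSucc b (k-1) (by omega)]
    split_ifs <;> omega
  · rw [pvModSucc b (b-1) (by omega)]
    split_ifs <;> omega

-- cycle: membership in A's raw list at k
theorem pvMemCycleA (b k x : Int) (hk : 0 ≤ k ∧ k < b) :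
    x ∈ (((PySem.List.pyRange 0 b 1).flatMap
          (fun i => [(i, PySem.Int.mod (i+1) b), (i, PySem.Int.mod (i-1) b)])).filter
          (fun p => p.1 == k)).map (fun p => p.2)
    ↔ (x = PySem.Int.mod (k+1) b ∨ x = PySem.Int.mod (k-1) b) := by
  simp only [List.mem_map, List.mem_filter, List.mem_flatMap, PySem.List.mem_pyRange_one,
    beq_iff_eq, List.mem_cons, List.not_mem_nil]
  constructor
  · rintro ⟨p, ⟨⟨i, hi, hp⟩, hk1⟩, hx⟩
    rcases hp with h | h | h
    · subst h; simp_all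
    · subst h; simp_all
    · exact absurd h (by simp)
  · rintro (h | h)
    · exact ⟨(k, PySem.Int.mod (k+1) b), ⟨⟨k, hk, by simp⟩, rfl⟩, h.symm⟩
    · exact ⟨(k, PySem.Int.mod (k-1) b), ⟨⟨k, hk, by simp⟩, rfl⟩, h.symm⟩

-- cycle: membership coming from B's edge relation at k
theorem pvMemCycleB (b k x : Int) (hk : 0 ≤ k ∧ k < b) :
    (∃ e ∈ (PySem.List.pyRange 0 b 1).map (fun i => pvNormPair i (PySem.Int.mod (i+1) b)),
        (e.1 = k ∧ x = e.2) ∨ (e.2 = k ∧ x = e.1))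
    ↔ (x = PySem.Int.mod (k+1) b ∨ x = PySem.Int.mod (k-1) b) := by
  simp only [List.mem_map, PySem.List.mem_pyRange_one]
  constructor
  · rintro ⟨e, ⟨i, hi, he⟩, hc⟩
    subst he
    rw [pvNormPairSym] at hc
    rcases hc with ⟨h1, h2⟩ | ⟨h1, h2⟩
    · subst h1; exact Or.inl h2
    · right
      rw [pvModSucc b i hi] at h1
      rw [pvModPred b k hk]
      split_ifs at h1 ⊢ <;> omega
  · rintro (h | h)
    · exact ⟨pvNormPair k (PySem.Int.mod (k+1) b), ⟨k, hk, rfl⟩,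
        (pvNormPairSym _ _ _ _).mpr (Or.inl ⟨rfl, h⟩)⟩
    · obtain ⟨h1, h2, h3⟩ := pvCycleArith b k hk
      exact ⟨pvNormPair (PySem.Int.mod (k-1) b) (PySem.Int.mod (PySem.Int.mod (k-1) b + 1) b),
        ⟨PySem.Int.mod (k-1) b, ⟨h1, h2⟩, rfl⟩,
        (pvNormPairSym _ _ _ _).mpr (Or.inr ⟨h3, h⟩)⟩

-- path: both sides reduce to the same edge condition
theorem pvMemPathA (b k x : Int) :
    x ∈ (((PySem.List.pyRange 0 (b-1) 1).flatMap
          (fun i => [(i, i+1), (i+1, i)])).filter (fun p => p.1 == k)).map (fun p => p.2)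
    ↔ (∃ i, (0 ≤ i ∧ i < b-1) ∧ ((i = k ∧ x = i+1) ∨ (i+1 = k ∧ x = i))) := by
  simp only [List.mem_map, List.mem_filter, List.mem_flatMap, PySem.List.mem_pyRange_one,
    beq_iff_eq, List.mem_cons, List.not_mem_nil]
  constructor
  · rintro ⟨p, ⟨⟨i, hi, hp⟩, hk1⟩, hx⟩
    rcases hp with h | h | h
    · subst h; exact ⟨i, hi, Or.inl ⟨hk1, hx.symm⟩⟩
    · subst h; exact ⟨i, hi, Or.inr ⟨hk1, hx.symm⟩⟩
    · exact absurd h (by simp)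
  · rintro ⟨i, hi, ⟨h1, h2⟩ | ⟨h1, h2⟩⟩
    · exact ⟨(i, i+1), ⟨⟨i, hi, by simp⟩, h1⟩, h2.symm⟩
    · exact ⟨(i+1, i), ⟨⟨i, hi, by simp⟩, h1⟩, h2.symm⟩

theorem pvMemPathB (b k x : Int) :
    (∃ e ∈ (PySem.List.pyRange 0 (b-1) 1).map (fun i => ((i, i+1) : Int × Int)),
        (e.1 = k ∧ x = e.2) ∨ (e.2 = k ∧ x = e.1))
    ↔ (∃ i, (0 ≤ i ∧ i < b-1) ∧ ((i = k ∧ x = i+1) ∨ (i+1 = k ∧ x = i))) := by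
  simp only [List.mem_map, PySem.List.mem_pyRange_one]
  constructor
  · rintro ⟨e, ⟨i, hi, he⟩, hc⟩
    subst he
    exact ⟨i, hi, hc⟩
  · rintro ⟨i, hi, hc⟩
    exact ⟨(i, i+1), ⟨i, hi, rfl⟩, hc⟩

-- complete: both sides are "every other node"
theorem pvMemCompA (b k x : Int) (hk : 0 ≤ k ∧ k < b) :
    x ∈ (PySem.List.pyRange 0 b 1).filter (fun j => !(j == k))
    ↔ (0 ≤ x ∧ x < b ∧ x ≠ k) := by
  simp only [List.mem_filter, PySem.List.mem_pyRange_one, Bool.not_eq_eq_eq_not, Bool.not_true,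
    beq_eq_false_iff_ne, ne_eq]
  tauto

theorem pvMemCompB (b k x : Int) (hk : 0 ≤ k ∧ k < b) :
    (∃ e ∈ (PySem.List.pyRange 0 b 1).flatMap
        (fun i => (PySem.List.pyRange (i+1) b 1).map (fun j => ((i, j) : Int × Int))),
        (e.1 = k ∧ x = e.2) ∨ (e.2 = k ∧ x = e.1))
    ↔ (0 ≤ x ∧ x < b ∧ x ≠ k) := by
  simp only [List.mem_flatMap, List.mem_map, PySem.List.mem_pyRange_one]
  constructor
  · rintro ⟨e, ⟨i, hi, j, hj, he⟩, hc⟩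
    subst he
    rcases hc with ⟨h1, h2⟩ | ⟨h1, h2⟩ <;> subst h1 <;> subst h2 <;> simp at hi hj ⊢ <;> omega
  · rintro ⟨h1, h2, h3⟩
    by_cases hxk : x < k
    · exact ⟨(x, k), ⟨x, ⟨by omega, by omega⟩, k, ⟨by omega, by omega⟩, rfl⟩,
        Or.inr ⟨rfl, rfl⟩⟩
    · exact ⟨(k, x), ⟨k, ⟨by omega, by omega⟩, x, ⟨by omega, by omega⟩, rfl⟩,
        Or.inl ⟨rfl, rfl⟩⟩


-- one branch pipeline at a time: A's items and B's items both equal the canonical map over range(b)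
theorem pvMain (b : Int) (t : String) : build_base_adj_py b t = build_base_adj_py_alt b t := by
  have hndR : (PySem.List.pyRange 0 b 1).Nodup := PySem.List.nodup_pyRange_one 0 b
  have hgA0 : ∀ k : Int, ((PySem.List.pyRange 0 b 1).foldl
      (fun d i => d.insert i ([] : List Int)) PySem.Dict.empty).getD k [] = [] := by
    intro k; rw [pvInitGetD _ hndR _ _ _, ite_self]
  have hmem0 : ∀ k x : Int, x ∈ ((PySem.List.pyRange 0 b 1).foldl
      (fun d i => d.insert i PySem.Set.empty) PySem.Dict.empty).getD k PySem.Set.empty ↔ False := by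
    intro k x
    rw [pvInitGetD _ hndR _ _ _, ite_self]
    simp [PySem.Set.empty]
  have hnod0 : ∀ k : Int, ((((PySem.List.pyRange 0 b 1).foldl
      (fun d i => d.insert i PySem.Set.empty) PySem.Dict.empty : PySem.Dict Int (PySem.Set Int))).getD k PySem.Set.empty).Nodup := by
    intro k; rw [pvInitGetD _ hndR _ _ _, ite_self]; exact List.nodup_nil
  simp only [build_base_adj_py, build_base_adj_py_alt]
  by_cases hc : (t == "cycle") = true
  · rw [if_pos hc, if_pos hc]
    -- === cycle ===
    have hre : ((PySem.List.pyRange 0 b 1).foldl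
        (fun d i => (d.modify i [] (fun l => l ++ [PySem.Int.mod (i+1) b])).modify i []
          (fun l => l ++ [PySem.Int.mod (i-1) b]))
        ((PySem.List.pyRange 0 b 1).foldl (fun d i => d.insert i ([] : List Int)) PySem.Dict.empty))
        = (((PySem.List.pyRange 0 b 1).flatMap
            (fun i => [(i, PySem.Int.mod (i+1) b), (i, PySem.Int.mod (i-1) b)])).foldl
          (fun d p => d.modify p.1 [] (fun l => l ++ [p.2]))
          ((PySem.List.pyRange 0 b 1).foldl (fun d i => d.insert i ([] : List Int)) PySem.Dict.empty)) :=
      pvFoldlTwoAppends (fun i => i) (fun i => i)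
        (fun i => PySem.Int.mod (i+1) b) (fun i => PySem.Int.mod (i-1) b) _ _
    have hsub : ∀ x ∈ ((PySem.List.pyRange 0 b 1).flatMap
        (fun i => [(i, PySem.Int.mod (i+1) b), (i, PySem.Int.mod (i-1) b)])).map (fun p => p.1),
        x ∈ PySem.List.pyRange 0 b 1 := by
      intro x hx
      simp only [List.mem_map, List.mem_flatMap, PySem.List.mem_pyRange_one, List.mem_cons,
        List.not_mem_nil] at hx ⊢
      obtain ⟨p, ⟨i, hi, hp⟩, hx⟩ := hx
      rcases hp with h | h | h
      · subst h; simp at hx; omega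
      · subst h; simp at hx; omega
      · exact absurd h (by simp)
    have hkA : ((PySem.List.pyRange 0 b 1).foldl
        (fun d i => (d.modify i [] (fun l => l ++ [PySem.Int.mod (i+1) b])).modify i []
          (fun l => l ++ [PySem.Int.mod (i-1) b]))
        ((PySem.List.pyRange 0 b 1).foldl (fun d i => d.insert i ([] : List Int)) PySem.Dict.empty)).keys
        = PySem.List.pyRange 0 b 1 := by
      rw [hre]
      have hkk := PySem.Dict.keys_foldl_modify_key
        ((PySem.List.pyRange 0 b 1).flatMap
          (fun i => [(i, PySem.Int.mod (i+1) b), (i, PySem.Int.mod (i-1) b)]))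
        (fun p => p.1) [] (fun _ p => fun l => l ++ [p.2])
        ((PySem.List.pyRange 0 b 1).foldl (fun d i => d.insert i ([] : List Int)) PySem.Dict.empty)
      rw [hkk, pvInitKeys _ hndR _, pvUpdateSubset _ _ hsub]
    have hgA : ∀ k : Int, ((PySem.List.pyRange 0 b 1).foldl
        (fun d i => (d.modify i [] (fun l => l ++ [PySem.Int.mod (i+1) b])).modify i []
          (fun l => l ++ [PySem.Int.mod (i-1) b]))
        ((PySem.List.pyRange 0 b 1).foldl (fun d i => d.insert i ([] : List Int)) PySem.Dict.empty)).getD k []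
        = ((((PySem.List.pyRange 0 b 1).flatMap
            (fun i => [(i, PySem.Int.mod (i+1) b), (i, PySem.Int.mod (i-1) b)])).filter
            (fun p => p.1 == k)).map (fun p => p.2)) := by
      intro k
      rw [hre, PySem.Dict.getD_foldl_modify_append, hgA0 k, List.nil_append]
    have hcont : ∀ e ∈ (PySem.Set.ofList ((PySem.List.pyRange 0 b 1).map
        (fun i => pvNormPair i (PySem.Int.mod (i+1) b))) : List (Int × Int)),
        ((PySem.List.pyRange 0 b 1).foldl
          (fun d i => d.insert i PySem.Set.empty) PySem.Dict.empty : PySem.Dict Int (PySem.Set Int)).contains e.1 = true ∧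
        ((PySem.List.pyRange 0 b 1).foldl
          (fun d i => d.insert i PySem.Set.empty) PySem.Dict.empty : PySem.Dict Int (PySem.Set Int)).contains e.2 = true := by
      intro e he
      have he' := (PySem.Set.mem_ofList _ _).mp he
      obtain ⟨i, hi, rfl⟩ := List.mem_map.mp he'
      have hib := PySem.List.mem_pyRange_one.mp hi
      have hm1 : 0 ≤ PySem.Int.mod (i+1) b ∧ PySem.Int.mod (i+1) b < b :=
        ⟨PySem.Int.mod_nonneg _ (by omega), PySem.Int.mod_lt _ (by omega)⟩
      obtain ⟨h1, h2⟩ := pvNormPairMem i (PySem.Int.mod (i+1) b)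
      constructor <;>
        [ (rcases h1 with h | h) ; (rcases h2 with h | h) ] <;>
        · rw [h, PySem.Dict.contains_iff_mem_keys, pvInitKeys _ hndR _,
            PySem.List.mem_pyRange_one]
          omega
    have hkB := pvBKeys _ _ hcont
    rw [pvFinishA _ _ hkA hndR, pvFinishB _ _ (by rw [hkB, pvInitKeys _ hndR _]) hndR]
    apply List.map_congr_left
    intro k hk
    have hkb : 0 ≤ k ∧ k < b := by
      have := PySem.List.mem_pyRange_one.mp hk; omega
    simp only [Prod.mk.injEq]
    refine ⟨by trivial, ?_⟩
    rw [hgA k]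
    apply pvPointwise _ _ (pvBNodup _ _ hnod0 k)
    intro x
    rw [pvMemCycleA b k x hkb, pvBMem _ _ k x]
    simp only [hmem0 k x, false_or, PySem.Set.mem_ofList]
    exact (pvMemCycleB b k x hkb).symm
  · rw [if_neg hc, if_neg hc]
    by_cases hp : (t == "path") = true
    · rw [if_pos hp, if_pos hp]
      -- === path ===
      have hre : ((PySem.List.pyRange 0 (b-1) 1).foldl
          (fun d i => (d.modify i [] (fun l => l ++ [i+1])).modify (i+1) [] (fun l => l ++ [i]))
          ((PySem.List.pyRange 0 b 1).foldl (fun d i => d.insert i ([] : List Int)) PySem.Dict.empty))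
          = (((PySem.List.pyRange 0 (b-1) 1).flatMap (fun i => [(i, i+1), (i+1, i)])).foldl
            (fun d p => d.modify p.1 [] (fun l => l ++ [p.2]))
            ((PySem.List.pyRange 0 b 1).foldl (fun d i => d.insert i ([] : List Int)) PySem.Dict.empty)) :=
        pvFoldlTwoAppends (fun i => i) (fun i => i+1) (fun i => i+1) (fun i => i) _ _
      have hsub : ∀ x ∈ ((PySem.List.pyRange 0 (b-1) 1).flatMap
          (fun i => [(i, i+1), (i+1, i)])).map (fun p => p.1),
          x ∈ PySem.List.pyRange 0 b 1 := by
        intro x hx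
        simp only [List.mem_map, List.mem_flatMap, PySem.List.mem_pyRange_one, List.mem_cons,
          List.not_mem_nil] at hx ⊢
        obtain ⟨p, ⟨i, hi, hp'⟩, hx⟩ := hx
        rcases hp' with h | h | h
        · subst h; simp at hx; omega
        · subst h; simp at hx; omega
        · exact absurd h (by simp)
      have hkA : ((PySem.List.pyRange 0 (b-1) 1).foldl
          (fun d i => (d.modify i [] (fun l => l ++ [i+1])).modify (i+1) [] (fun l => l ++ [i]))
          ((PySem.List.pyRange 0 b 1).foldl (fun d i => d.insert i ([] : List Int)) PySem.Dict.empty)).keys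
          = PySem.List.pyRange 0 b 1 := by
        rw [hre]
        have hkk := PySem.Dict.keys_foldl_modify_key
          ((PySem.List.pyRange 0 (b-1) 1).flatMap (fun i => [(i, i+1), (i+1, i)]))
          (fun p => p.1) [] (fun _ p => fun l => l ++ [p.2])
          ((PySem.List.pyRange 0 b 1).foldl (fun d i => d.insert i ([] : List Int)) PySem.Dict.empty)
        rw [hkk, pvInitKeys _ hndR _, pvUpdateSubset _ _ hsub]
      have hgA : ∀ k : Int, ((PySem.List.pyRange 0 (b-1) 1).foldl
          (fun d i => (d.modify i [] (fun l => l ++ [i+1])).modify (i+1) [] (fun l => l ++ [i]))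
          ((PySem.List.pyRange 0 b 1).foldl (fun d i => d.insert i ([] : List Int)) PySem.Dict.empty)).getD k []
          = ((((PySem.List.pyRange 0 (b-1) 1).flatMap (fun i => [(i, i+1), (i+1, i)])).filter
              (fun p => p.1 == k)).map (fun p => p.2)) := by
        intro k
        rw [hre, PySem.Dict.getD_foldl_modify_append, hgA0 k, List.nil_append]
      have hcont : ∀ e ∈ (PySem.Set.ofList ((PySem.List.pyRange 0 (b-1) 1).map
          (fun i => ((i, i+1) : Int × Int))) : List (Int × Int)),
          ((PySem.List.pyRange 0 b 1).foldl
            (fun d i => d.insert i PySem.Set.empty) PySem.Dict.empty : PySem.Dict Int (PySem.Set Int)).contains e.1 = true ∧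
          ((PySem.List.pyRange 0 b 1).foldl
            (fun d i => d.insert i PySem.Set.empty) PySem.Dict.empty : PySem.Dict Int (PySem.Set Int)).contains e.2 = true := by
        intro e he
        have he' := (PySem.Set.mem_ofList _ _).mp he
        obtain ⟨i, hi, rfl⟩ := List.mem_map.mp he'
        have hib := PySem.List.mem_pyRange_one.mp hi
        constructor <;>
          · rw [PySem.Dict.contains_iff_mem_keys, pvInitKeys _ hndR _,
              PySem.List.mem_pyRange_one]
            dsimp only
            omega
      have hkB := pvBKeys _ _ hcont
      rw [pvFinishA _ _ hkA hndR, pvFinishB _ _ (by rw [hkB, pvInitKeys _ hndR _]) hndR]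
      apply List.map_congr_left
      intro k hk
      simp only [Prod.mk.injEq]
      refine ⟨by trivial, ?_⟩
      rw [hgA k]
      apply pvPointwise _ _ (pvBNodup _ _ hnod0 k)
      intro x
      rw [pvMemPathA b k x, pvBMem _ _ k x]
      simp only [hmem0 k x, false_or, PySem.Set.mem_ofList]
      exact (pvMemPathB b k x).symm
    · rw [if_neg hp, if_neg hp]
      -- === complete ===
      have hkA : ((PySem.List.pyRange 0 b 1).foldl
          (fun d i => d.insert i ((PySem.List.pyRange 0 b 1).filter (fun j => !(j == i))))
          ((PySem.List.pyRange 0 b 1).foldl (fun d i => d.insert i ([] : List Int)) PySem.Dict.empty)).keys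
          = PySem.List.pyRange 0 b 1 := by
        have hkk := PySem.Dict.keys_foldl_insert (PySem.List.pyRange 0 b 1)
          (fun _ i => (PySem.List.pyRange 0 b 1).filter (fun j => !(j == i)))
          ((PySem.List.pyRange 0 b 1).foldl (fun d i => d.insert i ([] : List Int)) PySem.Dict.empty)
        rw [hkk, pvInitKeys _ hndR _, pvUpdateSubset _ _ (fun x hx => hx)]
      have hgA : ∀ k : Int, k ∈ PySem.List.pyRange 0 b 1 →
          ((PySem.List.pyRange 0 b 1).foldl
            (fun d i => d.insert i ((PySem.List.pyRange 0 b 1).filter (fun j => !(j == i))))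
            ((PySem.List.pyRange 0 b 1).foldl (fun d i => d.insert i ([] : List Int)) PySem.Dict.empty)).getD k []
          = (PySem.List.pyRange 0 b 1).filter (fun j => !(j == k)) := by
        intro k hk
        have h := pvInsGetD (fun i => (PySem.List.pyRange 0 b 1).filter (fun j => !(j == i)))
          (PySem.List.pyRange 0 b 1)
          ((PySem.List.pyRange 0 b 1).foldl (fun d i => d.insert i ([] : List Int)) PySem.Dict.empty)
          k hndR
        rw [h, if_pos hk]
      have hcont : ∀ e ∈ (PySem.Set.ofList ((PySem.List.pyRange 0 b 1).flatMap
          (fun i => (PySem.List.pyRange (i+1) b 1).map (fun j => ((i, j) : Int × Int)))) : List (Int × Int)),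
          ((PySem.List.pyRange 0 b 1).foldl
            (fun d i => d.insert i PySem.Set.empty) PySem.Dict.empty : PySem.Dict Int (PySem.Set Int)).contains e.1 = true ∧
          ((PySem.List.pyRange 0 b 1).foldl
            (fun d i => d.insert i PySem.Set.empty) PySem.Dict.empty : PySem.Dict Int (PySem.Set Int)).contains e.2 = true := by
        intro e he
        have he' := (PySem.Set.mem_ofList _ _).mp he
        obtain ⟨i, hi, j, hj, rfl⟩ := by
          simpa only [List.mem_flatMap, List.mem_map] using he'
        have hib := PySem.List.mem_pyRange_one.mp hi
        have hjb := PySem.List.mem_pyRange_one.mp hj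
        constructor <;>
          · rw [PySem.Dict.contains_iff_mem_keys, pvInitKeys _ hndR _,
              PySem.List.mem_pyRange_one]
            dsimp only
            omega
      have hkB := pvBKeys _ _ hcont
      rw [pvFinishA _ _ hkA hndR, pvFinishB _ _ (by rw [hkB, pvInitKeys _ hndR _]) hndR]
      apply List.map_congr_left
      intro k hk
      have hkb : 0 ≤ k ∧ k < b := by
        have := PySem.List.mem_pyRange_one.mp hk; omega
      simp only [Prod.mk.injEq]
      refine ⟨by trivial, ?_⟩
      rw [hgA k hk]
      apply pvPointwise _ _ (pvBNodup _ _ hnod0 k)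
      intro x
      rw [pvMemCompA b k x hkb, pvBMem _ _ k x]
      simp only [hmem0 k x, false_or, PySem.Set.mem_ofList]
      exact (pvMemCompB b k x hkb).symm

-- ===== VERDICT (by name: the statement is the Claim_ definition above) =====
theorem build_base_adj_py_spec : Claim_equal_build_base_adj_py := by
  intro b t _
  unfold Spec_build_base_adj_py
  exact pvMain b t
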